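-- pv_equiv track=rewrite | github.com/Cristopher-Artacho-WVSU/NLP_Assignment6 | Unit_6_Exercise.py | train_hmm
-- ===== SOURCE A (Python) =====
-- from collections import defaultdict
--
-- def train_hmm(sentences):
--     transition_counts = defaultdict(lambda: defaultdict(int))
--     emission_counts = defaultdict(lambda: defaultdict(int))
--     tag_counts = defaultdict(int)
--     vocab = set()
--     tags = set()
--
--     for sentence in sentences:
--         words_tags = sentence.strip().split()
--         prev_tag = "START"
--
--         for wt in words_tags:
--             word, tag = wt.rsplit('_', 1)
--             vocab.add(word)
--             tags.add(tag)
--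
--             # Transition count
--             transition_counts[prev_tag][tag] += 1
--             tag_counts[prev_tag] += 1
--
--             # Emission count
--             emission_counts[tag][word] += 1
--             tag_counts[tag] += 1
--
--             prev_tag = tag
--
--         # Final END transition
--         transition_counts[prev_tag]["END"] += 1
--         tag_counts[prev_tag] += 1
--
--     return transition_counts, emission_counts, tag_counts, vocab, tags
-- ===== SOURCE B (Python) =====
-- from collections import defaultdict
--
-- def count_pairs(pairs):
--     """Fold a list of (a, b) pairs into a nested defaultdict of counts."""
--     d = defaultdict(lambda: defaultdict(int))
--     for a, b in pairs:
--         d[a][b] += 1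
--     return d
--
-- def train_hmm(sentences):
--     # Staged pipeline: parse everything first, then build explicit pair
--     # streams, then count each stream with one generic counter.
--     parsed = [[tuple(wt.rsplit('_', 1)) for wt in s.strip().split()]
--               for s in sentences]
--
--     trans_pairs = []
--     for toks in parsed:
--         tags = [t for _, t in toks]
--         trans_pairs.extend(zip(["START"] + tags, tags + ["END"]))
--     emis_pairs = [(t, w) for toks in parsed for w, t in toks]
--
--     transition_counts = count_pairs(trans_pairs)
--     emission_counts = count_pairs(emis_pairs)
--
--     # tag_counts derived from the finished dicts: for each source tag,
--     # outgoing transitions + emitted words.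
--     tag_counts = defaultdict(int)
--     for t, outs in transition_counts.items():
--         tag_counts[t] = sum(outs.values()) + sum(emission_counts.get(t, {}).values())
--
--     vocab = set(w for toks in parsed for w, _ in toks)
--     tags = set(t for toks in parsed for _, t in toks)
--     return transition_counts, emission_counts, tag_counts, vocab, tags
-- ===== Notes on version B (the rewrite author's own statement) =====
-- stated objective: alternative
-- what changed: B replaces A's single interleaved counting loop by a staged pipeline: parse all tokens first, materialise explicit transition and emission pair streams (transitions via zip with START/END padding), count each stream with one generic pair counter, and derive tag_counts afterwards from the finished dicts as outgoing-transition sums plus emission sums per source tag.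
import Mathlib
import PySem

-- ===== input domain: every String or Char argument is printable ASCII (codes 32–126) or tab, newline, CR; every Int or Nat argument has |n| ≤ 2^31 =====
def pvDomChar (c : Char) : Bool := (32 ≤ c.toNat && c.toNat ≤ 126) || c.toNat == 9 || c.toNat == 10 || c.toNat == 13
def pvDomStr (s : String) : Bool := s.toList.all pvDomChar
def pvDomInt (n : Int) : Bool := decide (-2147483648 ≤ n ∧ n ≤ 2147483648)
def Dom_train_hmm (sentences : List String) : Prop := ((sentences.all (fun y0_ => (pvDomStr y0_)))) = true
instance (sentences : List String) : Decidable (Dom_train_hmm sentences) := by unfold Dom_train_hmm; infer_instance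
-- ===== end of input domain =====

-- B replaces A's single interleaved counting loop by a staged pipeline: parse all tokens first,
-- build explicit transition/emission pair streams, count each with one generic pair counter,
-- and derive tag_counts afterwards from the finished dicts (objective: alternative).

-- Hand port of wt.rsplit('_', 1) (not in PySem): exact — splits at the LAST '_';
-- none exactly where Python's 2-place unpacking raises ValueError (no '_' in the token).
def rsplitU : List Char → Option (List Char × List Char)
  | [] => none
  | c :: rest =>
    match rsplitU rest with
    | some (w, t) => some (c :: w, t)
    | none => if c = '_' then some ([], rest) else none

-- ===== PORT A =====
def stepA (st : PySem.Dict String (PySem.Dict String Int) × PySem.Dict String (PySem.Dict String Int) × PySem.Dict String Int × PySem.Set String × PySem.Set String × String) (wt : String) :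
    PySem.Dict String (PySem.Dict String Int) × PySem.Dict String (PySem.Dict String Int) × PySem.Dict String Int × PySem.Set String × PySem.Set String × String :=
  match rsplitU wt.toList with
  | none => st   -- Python raises ValueError here; excluded by Pre_train_hmm
  | some (w, t) =>
    match st with
    | (tr, em, tc, v, tg, prev) =>
      let word := String.ofList w
      let tag := String.ofList t
      let v := PySem.Set.add v word
      let tg := PySem.Set.add tg tag
      let tr := tr.modify prev PySem.Dict.empty (fun d => d.modify tag 0 (· + 1))
      let tc := tc.modify prev 0 (· + 1)
      let em := em.modify tag PySem.Dict.empty (fun d => d.modify word 0 (· + 1))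
      let tc := tc.modify tag 0 (· + 1)
      (tr, em, tc, v, tg, tag)

def sentA (st : PySem.Dict String (PySem.Dict String Int) × PySem.Dict String (PySem.Dict String Int) × PySem.Dict String Int × PySem.Set String × PySem.Set String) (sentence : String) :
    PySem.Dict String (PySem.Dict String Int) × PySem.Dict String (PySem.Dict String Int) × PySem.Dict String Int × PySem.Set String × PySem.Set String :=
  match st with
  | (tr, em, tc, v, tg) =>
    match (PySem.Str.split₀ (PySem.Str.strip sentence)).foldl stepA (tr, em, tc, v, tg, "START") with
    | (tr, em, tc, v, tg, prev) =>
      (tr.modify prev PySem.Dict.empty (fun d => d.modify "END" 0 (· + 1)), em,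
       tc.modify prev 0 (· + 1), v, tg)

def train_hmm (sentences : List String) : (List (String × List (String × Int))) × (List (String × List (String × Int))) × (List (String × Int)) × List String × List String :=
  match sentences.foldl sentA (PySem.Dict.empty, PySem.Dict.empty, PySem.Dict.empty, PySem.Set.empty, PySem.Set.empty) with
  | (tr, em, tc, v, tg) =>
    (tr.items.map (fun p => (p.1, p.2.items)), em.items.map (fun p => (p.1, p.2.items)), tc.items, v, tg)

-- ===== PORT B =====
-- B, staged: parse each sentence into (word, tag) tokens (a failing token is where Python
-- raises; dropped here, outside Pre_), then count explicit pair streams.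
def parseTok (wt : String) : Option (String × String) :=
  (rsplitU wt.toList).map (fun p => (String.ofList p.1, String.ofList p.2))

def parseSent (s : String) : List (String × String) :=
  (PySem.Str.split₀ (PySem.Str.strip s)).filterMap parseTok

def pairMod (d : PySem.Dict String (PySem.Dict String Int)) (q : String × String) : PySem.Dict String (PySem.Dict String Int) :=
  d.modify q.1 PySem.Dict.empty (fun inner => inner.modify q.2 0 (· + 1))

def countPairs (ps : List (String × String)) : PySem.Dict String (PySem.Dict String Int) :=
  ps.foldl pairMod PySem.Dict.empty

def sentTransPairs (toks : List (String × String)) : List (String × String) :=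
  let tags := toks.map (·.2)
  ("START" :: tags).zip (tags ++ ["END"])

def train_hmm_alt (sentences : List String) : (List (String × List (String × Int))) × (List (String × List (String × Int))) × (List (String × Int)) × List String × List String :=
  let parsed := sentences.map parseSent
  let tr := countPairs (parsed.flatMap sentTransPairs)
  let em := countPairs (parsed.flatMap (fun toks => toks.map (fun q => (q.2, q.1))))
  let tc := tr.items.foldl
    (fun d q => d.insert q.1 ((q.2.values).sum + ((em.getD q.1 PySem.Dict.empty).values).sum))
    PySem.Dict.empty
  let vocab := PySem.Set.ofList (parsed.flatMap (fun toks => toks.map (·.1)))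
  let tags := PySem.Set.ofList (parsed.flatMap (fun toks => toks.map (·.2)))
  (tr.items.map (fun q => (q.1, q.2.items)), em.items.map (fun q => (q.1, q.2.items)), tc.items, vocab, tags)

-- ===== PRECONDITION & SPEC =====
-- Pre_ excludes exactly the inputs where Python A raises ValueError: some whitespace-separated
-- token of some sentence contains no '_' (the 'word, tag = wt.rsplit('_', 1)' unpacking fails).
def Pre_train_hmm (sentences : List String) : Prop :=
  ∀ s ∈ sentences, ∀ wt ∈ PySem.Str.split₀ (PySem.Str.strip s), '_' ∈ wt.toList
instance (sentences : List String) : Decidable (Pre_train_hmm sentences) := by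
  unfold Pre_train_hmm; infer_instance
def pvWitness_train_hmm : List String := ["the_D dog_N", " ", "runs_V"]

def Spec_train_hmm (sentences : List String) (out : (List (String × List (String × Int))) × (List (String × List (String × Int))) × (List (String × Int)) × List String × List String) : Prop := out = train_hmm_alt sentences
instance (sentences : List String) (out : (List (String × List (String × Int))) × (List (String × List (String × Int))) × (List (String × Int)) × List String × List String) : Decidable (Spec_train_hmm sentences out) := by
  unfold Spec_train_hmm
  haveI h5 : DecidableEq (List String × List String) := instDecidableEqProd
  haveI h4 : DecidableEq (List (String × Int) × (List String × List String)) := instDecidableEqProd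
  haveI h3 : DecidableEq (List (String × List (String × Int)) × (List (String × Int) × (List String × List String))) := instDecidableEqProd
  exact instDecidableEqProd out (train_hmm_alt sentences)

-- ===== CLAIM (what is proved, stated in full; the proofs are below) =====
def Claim_equal_train_hmm : Prop := ∀ (sentences : List String), Dom_train_hmm sentences → Pre_train_hmm sentences → Spec_train_hmm sentences (train_hmm sentences)

-- ===== LEMMAS AND PROOFS =====

-- keys of insert/modify as a set-add
theorem pv_keys_insert {ν : Type} (d : PySem.Dict String ν) (k : String) (v : ν) :
    (d.insert k v).keys = PySem.Set.add d.keys k := by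
  by_cases hc : d.contains k = true
  · have hk : k ∈ d.keys := by
      have h := PySem.Dict.contains_eq_decide_mem_keys d k
      rw [hc] at h; exact of_decide_eq_true h.symm
    have hadd : PySem.Set.add d.keys k = d.keys := by
      simp [PySem.Set.add, PySem.Set.contains, hk]
    rw [hadd]
    simp only [PySem.Dict.keys, PySem.Dict.items_insert, hc, if_true, List.map_map]
    apply List.map_congr_left
    intro p _
    by_cases h : p.1 = k <;> simp [h]
  · have hk : k ∉ d.keys := by
      have h := PySem.Dict.contains_eq_decide_mem_keys d k
      rw [eq_false_of_ne_true hc] at h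
      exact of_decide_eq_false h.symm
    have hadd : PySem.Set.add d.keys k = d.keys ++ [k] := by
      simp [PySem.Set.add, PySem.Set.contains, hk]
    rw [hadd]
    simp [PySem.Dict.keys, PySem.Dict.items_insert, eq_false_of_ne_true hc]

theorem pv_keys_modify {ν : Type} (d : PySem.Dict String ν) (k : String) (d0 : ν) (f : ν → ν) :
    (d.modify k d0 f).keys = PySem.Set.add d.keys k := by
  rw [PySem.Dict.keys_modify]; exact pv_keys_insert d k (f (d.getD k d0))

theorem pv_add_idem (s : PySem.Set String) (x : String) :
    PySem.Set.add (PySem.Set.add s x) x = PySem.Set.add s x := by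
  by_cases hx : x ∈ s
  · simp [PySem.Set.add, PySem.Set.contains, hx]
  · simp [PySem.Set.add, PySem.Set.contains, hx]

theorem pv_getD_of_not_contains {ν : Type} (d : PySem.Dict String ν) (k : String) (dflt : ν)
    (h : d.contains k = false) : d.getD k dflt = dflt := by
  have hn : d.get? k = none := (PySem.Dict.get?_eq_none_iff_contains d k).mpr h
  simp [PySem.Dict.getD, hn]

theorem pv_mem_items_getD {ν : Type} (d : PySem.Dict String ν) (k : String) (dflt : ν)
    (hc : d.contains k = true) : (k, d.getD k dflt) ∈ d.items := by
  cases hf : List.find? (fun p => p.1 == k) d.items with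
  | none =>
    exfalso
    have : ∀ p ∈ d.items, ¬ (p.1 == k) = true := by
      intro p hp
      exact (List.find?_eq_none.mp hf) p hp
    have hc' : d.contains k = true := hc
    simp only [PySem.Dict.contains, List.any_eq_true] at hc'
    obtain ⟨p, hp, hpk⟩ := hc'
    exact this p hp hpk
  | some p =>
    have hmem := List.mem_of_find?_eq_some hf
    have hpk := List.find?_some hf
    have hk : p.1 = k := by simpa using hpk
    have : d.getD k dflt = p.2 := by
      simp [PySem.Dict.getD, PySem.Dict.get?, hf]
    rw [this, ← hk]
    exact hmem

-- bumping the (unique) entry for k adds 1 to the sum of values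
theorem pv_sum_snd_bump (l : List (String × Int)) (k : String) (v : Int)
    (hn : (l.map (·.1)).Nodup) (hv : (k, v) ∈ l) :
    ((l.map (fun p => if (p.1 == k) = true then (k, v + 1) else p)).map (·.2)).sum
      = (l.map (·.2)).sum + 1 := by
  induction l with
  | nil => simp at hv
  | cons h t ih =>
    simp only [List.map_cons, List.nodup_cons] at hn
    by_cases hk : h.1 = k
    · have hknot : k ∉ t.map (·.1) := by rw [← hk]; exact hn.1
      have hhv : h = (k, v) := by
        rcases List.mem_cons.mp hv with h1 | h2
        · exact h1.symm
        · exact absurd (List.mem_map.mpr ⟨(k, v), h2, rfl⟩) hknot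
      have htid : t.map (fun p => if (p.1 == k) = true then (k, v + 1) else p) = t.map id := by
        apply List.map_congr_left
        intro q hq
        have hqk : ¬ q.1 = k := fun he => hknot (he ▸ List.mem_map.mpr ⟨q, hq, rfl⟩)
        simp [hqk]
      subst hhv
      simp only [List.map_cons, htid, List.map_id, List.sum_cons]
      simp
      omega
    · have hhv : (k, v) ∈ t := by
        rcases List.mem_cons.mp hv with h1 | h2
        · exact absurd (by rw [← h1]) hk
        · exact h2
      have hne : ¬ (h.1 == k) = true := by simpa using hk
      simp only [List.map_cons, if_neg hne, List.sum_cons, ih hn.2 hhv]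
      omega

theorem pv_sumV_modify (d : PySem.Dict String Int) (k : String) (h : d.keys.Nodup) :
    ((d.modify k 0 (· + 1)).values).sum = (d.values).sum + 1 := by
  have hm : d.modify k 0 (· + 1) = d.insert k (d.getD k 0 + 1) := rfl
  rw [hm]
  by_cases hc : d.contains k = true
  · have hmem := pv_mem_items_getD d k 0 hc
    have hn : (d.items.map (·.1)).Nodup := h
    simp only [PySem.Dict.values, PySem.Dict.items_insert, hc, if_true]
    exact pv_sum_snd_bump d.items k (d.getD k 0) hn hmem
  · have hc' : d.contains k = false := eq_false_of_ne_true hc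
    have hg : d.getD k 0 = 0 := pv_getD_of_not_contains d k 0 hc'
    simp [PySem.Dict.values, PySem.Dict.items_insert, hc', hg]

-- the loop invariant tying A's tag_counts to the transition/emission dicts
def InvT (tr em : PySem.Dict String (PySem.Dict String Int)) (tc : PySem.Dict String Int) (p : String) : Prop :=
  tr.keys.Nodup ∧ em.keys.Nodup ∧ tc.keys.Nodup ∧
  (∀ q ∈ tr.items, q.2.keys.Nodup) ∧ (∀ q ∈ em.items, q.2.keys.Nodup) ∧
  (∀ t, tc.getD t 0 = ((tr.getD t PySem.Dict.empty).values).sum + ((em.getD t PySem.Dict.empty).values).sum) ∧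
  (tc.keys = tr.keys ∨ tc.keys = PySem.Set.add tr.keys p)

theorem pv_inner_nodup (tr : PySem.Dict String (PySem.Dict String Int)) (p : String)
    (h4 : ∀ q ∈ tr.items, q.2.keys.Nodup) :
    (tr.getD p PySem.Dict.empty).keys.Nodup := by
  by_cases hc : tr.contains p = true
  · exact h4 (p, tr.getD p PySem.Dict.empty) (pv_mem_items_getD tr p PySem.Dict.empty hc)
  · rw [pv_getD_of_not_contains tr p PySem.Dict.empty (eq_false_of_ne_true hc)]
    simp [PySem.Dict.keys_empty]

theorem pv_inner_nodup_step (tr : PySem.Dict String (PySem.Dict String Int)) (p tag : String)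
    (h4 : ∀ q ∈ tr.items, q.2.keys.Nodup) :
    ∀ q ∈ (tr.modify p PySem.Dict.empty (fun d => d.modify tag 0 (· + 1))).items, q.2.keys.Nodup := by
  intro q hq
  have hm : tr.modify p PySem.Dict.empty (fun d => d.modify tag 0 (· + 1))
      = tr.insert p ((tr.getD p PySem.Dict.empty).modify tag 0 (· + 1)) := rfl
  rw [hm] at hq
  rcases (PySem.Dict.mem_items_insert tr _ _ q).mp hq with h1 | h2
  · rw [h1]
    rw [pv_keys_modify]
    exact PySem.Set.nodup_add _ _ (pv_inner_nodup tr p h4)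
  · exact h4 q h2.1

theorem pv_step_inv (tr em : PySem.Dict String (PySem.Dict String Int)) (tc : PySem.Dict String Int)
    (p word tag : String) (h : InvT tr em tc p) :
    InvT (tr.modify p PySem.Dict.empty (fun d => d.modify tag 0 (· + 1)))
         (em.modify tag PySem.Dict.empty (fun d => d.modify word 0 (· + 1)))
         ((tc.modify p 0 (· + 1)).modify tag 0 (· + 1))
         tag := by
  obtain ⟨h1, h2, h3, h4, h5, h6, h7⟩ := h
  refine ⟨?_, ?_, ?_, ?_, ?_, ?_, ?_⟩
  · rw [pv_keys_modify]; exact PySem.Set.nodup_add _ _ h1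
  · rw [pv_keys_modify]; exact PySem.Set.nodup_add _ _ h2
  · rw [pv_keys_modify, pv_keys_modify]
    exact PySem.Set.nodup_add _ _ (PySem.Set.nodup_add _ _ h3)
  · exact pv_inner_nodup_step tr p tag h4
  · exact pv_inner_nodup_step em tag word h5
  · intro t
    simp only [PySem.Dict.getD_modify]
    have hTr := pv_inner_nodup tr p h4
    have hEm := pv_inner_nodup em tag h5
    have h6t := h6 t
    by_cases e1 : t = tag
    · subst e1
      by_cases e2 : t = p
      · subst e2
        have hs1 := pv_sumV_modify (tr.getD t PySem.Dict.empty) t hTr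
        have hs2 := pv_sumV_modify (em.getD t PySem.Dict.empty) word hEm
        simp only [if_true]
        rw [hs1, hs2]
        omega
      · have hs2 := pv_sumV_modify (em.getD t PySem.Dict.empty) word hEm
        simp only [if_true, if_neg e2]
        rw [hs2]
        omega
    · by_cases e2 : t = p
      · subst e2
        have hs1 := pv_sumV_modify (tr.getD t PySem.Dict.empty) tag hTr
        simp only [if_true, if_neg e1]
        rw [hs1]
        omega
      · simp only [if_neg e1, if_neg e2]
        exact h6t
  · rw [pv_keys_modify, pv_keys_modify, pv_keys_modify]
    right
    rcases h7 with hk | hk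
    · rw [hk]
    · rw [hk, pv_add_idem]

theorem pv_end_inv (tr em : PySem.Dict String (PySem.Dict String Int)) (tc : PySem.Dict String Int)
    (p : String) (h : InvT tr em tc p) (q : String) :
    InvT (tr.modify p PySem.Dict.empty (fun d => d.modify "END" 0 (· + 1))) em
         (tc.modify p 0 (· + 1)) q
    ∧ (tc.modify p 0 (· + 1)).keys
        = (tr.modify p PySem.Dict.empty (fun d => d.modify "END" 0 (· + 1))).keys := by
  obtain ⟨h1, h2, h3, h4, h5, h6, h7⟩ := h
  have hkeys : (tc.modify p 0 (· + 1)).keys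
      = (tr.modify p PySem.Dict.empty (fun d => d.modify "END" 0 (· + 1))).keys := by
    rw [pv_keys_modify, pv_keys_modify]
    rcases h7 with hk | hk
    · rw [hk]
    · rw [hk, pv_add_idem]
  refine ⟨⟨?_, h2, ?_, ?_, h5, ?_, Or.inl hkeys⟩, hkeys⟩
  · rw [pv_keys_modify]; exact PySem.Set.nodup_add _ _ h1
  · rw [pv_keys_modify]; exact PySem.Set.nodup_add _ _ h3
  · exact pv_inner_nodup_step tr p "END" h4
  · intro t
    rw [PySem.Dict.getD_modify, PySem.Dict.getD_modify]
    have hTr := pv_inner_nodup tr p h4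
    have h6t := h6 t
    by_cases e : t = p
    · subst e
      rw [if_pos rfl, if_pos rfl, pv_sumV_modify _ _ hTr]
      omega
    · rw [if_neg e, if_neg e, h6t]

-- last tag of a token list, defaulting to the incoming prev tag
def lastD (p : String) : List String → String
  | [] => p
  | t :: ts => lastD t ts

-- splitting B's zipped transition pairs into the in-sentence pairs plus the END pair
theorem pv_zip_split (tags : List String) :
    ∀ p e, (p :: tags).zip (tags ++ [e]) = (p :: tags).zip tags ++ [(lastD p tags, e)] := by
  induction tags with
  | nil => intro p e; simp [lastD]
  | cons t ts ih =>
    intro p e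
    simp only [List.cons_append, List.zip_cons_cons, lastD, List.cons.injEq, true_and]
    exact ih t e

-- the token loop of A, decomposed componentwise into B's staged folds
theorem pv_tok_fold (wts : List String) :
    ∀ tr em tc v tg p, InvT tr em tc p →
    ∃ tr' em' tc' v' tg' p',
      wts.foldl stepA (tr, em, tc, v, tg, p) = (tr', em', tc', v', tg', p') ∧
      tr' = ((p :: (wts.filterMap parseTok).map (·.2)).zip ((wts.filterMap parseTok).map (·.2))).foldl pairMod tr ∧
      em' = ((wts.filterMap parseTok).map (fun q => (q.2, q.1))).foldl pairMod em ∧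
      v' = ((wts.filterMap parseTok).map (·.1)).foldl PySem.Set.add v ∧
      tg' = ((wts.filterMap parseTok).map (·.2)).foldl PySem.Set.add tg ∧
      p' = lastD p ((wts.filterMap parseTok).map (·.2)) ∧
      InvT tr' em' tc' p' := by
  induction wts with
  | nil =>
    intro tr em tc v tg p h
    exact ⟨tr, em, tc, v, tg, p, rfl, by simp, rfl, rfl, rfl, rfl, h⟩
  | cons wt wts ih =>
    intro tr em tc v tg p h
    simp only [List.foldl_cons]
    cases hr : rsplitU wt.toList with
    | none =>
      have hpt : parseTok wt = none := by simp [parseTok, hr]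
      simp only [stepA, hr, List.filterMap_cons, hpt]
      exact ih tr em tc v tg p h
    | some pr =>
      obtain ⟨w, t⟩ := pr
      have hpt : parseTok wt = some (String.ofList w, String.ofList t) := by
        simp [parseTok, hr]
      simp only [stepA, hr, List.filterMap_cons, hpt, List.map_cons, List.zip_cons_cons,
        List.foldl_cons]
      have hinv := pv_step_inv tr em tc p (String.ofList w) (String.ofList t) h
      obtain ⟨tr', em', tc', v', tg', p', heq, h1, h2, h3, h4, h5, h6⟩ :=
        ih _ _ _ _ _ _ hinv
      refine ⟨tr', em', tc', v', tg', p', heq, ?_, h2, h3, h4, h5, h6⟩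
      simpa [pairMod] using h1

theorem pv_sentTransPairs_eq (toks : List (String × String)) :
    sentTransPairs toks = ("START" :: toks.map (·.2)).zip (toks.map (·.2) ++ ["END"]) := rfl

-- the sentence loop of A equals B's folds over the flattened pair streams
set_option maxHeartbeats 1000000 in
theorem pv_sent_fold (ss : List String) :
    ∀ tr em tc v tg, InvT tr em tc "START" → tc.keys = tr.keys →
    ∃ tr' em' tc' v' tg',
      ss.foldl sentA (tr, em, tc, v, tg) = (tr', em', tc', v', tg') ∧
      tr' = ((ss.map parseSent).flatMap sentTransPairs).foldl pairMod tr ∧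
      em' = ((ss.map parseSent).flatMap (fun toks => toks.map (fun q => (q.2, q.1)))).foldl pairMod em ∧
      v' = ((ss.map parseSent).flatMap (fun toks => toks.map (·.1))).foldl PySem.Set.add v ∧
      tg' = ((ss.map parseSent).flatMap (fun toks => toks.map (·.2))).foldl PySem.Set.add tg ∧
      InvT tr' em' tc' "START" ∧ tc'.keys = tr'.keys := by
  induction ss with
  | nil =>
    intro tr em tc v tg h hk
    exact ⟨tr, em, tc, v, tg, rfl, rfl, rfl, rfl, rfl, h, hk⟩
  | cons s ss ih =>
    intro tr em tc v tg h hk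
    simp only [List.foldl_cons, List.map_cons, List.flatMap_cons]
    obtain ⟨tr1, em1, tc1, v1, tg1, p1, heq, e1, e2, e3, e4, e5, hinv⟩ :=
      pv_tok_fold (PySem.Str.split₀ (PySem.Str.strip s)) tr em tc v tg "START" h
    obtain ⟨hinv2, hk2⟩ := pv_end_inv tr1 em1 tc1 p1 hinv "START"
    have hsA : sentA (tr, em, tc, v, tg) s
        = (tr1.modify p1 PySem.Dict.empty (fun d => d.modify "END" 0 (· + 1)), em1,
           tc1.modify p1 0 (· + 1), v1, tg1) := by
      simp only [sentA, heq]
    rw [hsA]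
    obtain ⟨tr', em', tc', v', tg', heq', f1, f2, f3, f4, hinv', hk'⟩ :=
      ih _ _ _ _ _ hinv2 hk2
    -- restate the token-fold equalities through parseSent (definitional)
    have e1' : tr1 = (("START" :: (parseSent s).map (·.2)).zip ((parseSent s).map (·.2))).foldl pairMod tr := e1
    have e2' : em1 = ((parseSent s).map (fun q => (q.2, q.1))).foldl pairMod em := e2
    have e3' : v1 = ((parseSent s).map (·.1)).foldl PySem.Set.add v := e3
    have e4' : tg1 = ((parseSent s).map (·.2)).foldl PySem.Set.add tg := e4
    have e5' : p1 = lastD "START" ((parseSent s).map (·.2)) := e5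
    refine ⟨tr', em', tc', v', tg', heq', ?_, ?_, ?_, ?_, hinv', hk'⟩
    · -- transition stream: the zipped pairs split into the token fold plus one END update
      rw [f1, e1', e5', pv_sentTransPairs_eq, pv_zip_split, List.foldl_append, List.foldl_append]
      simp only [List.foldl_cons, List.foldl_nil, pairMod]
    · rw [f2, e2', List.foldl_append]
    · rw [f3, e3', List.foldl_append]
    · rw [f4, e4', List.foldl_append]

theorem pv_inv_init : InvT PySem.Dict.empty PySem.Dict.empty PySem.Dict.empty "START" := by
  refine ⟨?_, ?_, ?_, ?_, ?_, ?_, Or.inl rfl⟩ <;>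
    simp [PySem.Dict.empty, PySem.Dict.values, PySem.Dict.getD, PySem.Dict.get?]

-- ===== VERDICT (by name: the statement is the Claim_ definition above) =====
theorem train_hmm_spec : Claim_equal_train_hmm := by
  intro sentences _ _
  unfold Spec_train_hmm train_hmm train_hmm_alt
  obtain ⟨tr', em', tc', v', tg', heq, e1, e2, e3, e4, hinv, hkeq⟩ :=
    pv_sent_fold sentences PySem.Dict.empty PySem.Dict.empty PySem.Dict.empty
      PySem.Set.empty PySem.Set.empty pv_inv_init rfl
  rw [heq]
  simp only []
  have etr : tr' = countPairs ((sentences.map parseSent).flatMap sentTransPairs) := e1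
  have eem : em' = countPairs ((sentences.map parseSent).flatMap (fun toks => toks.map (fun q => (q.2, q.1)))) := e2
  have ev : v' = PySem.Set.ofList ((sentences.map parseSent).flatMap (fun toks => toks.map (·.1))) := by
    rw [e3, PySem.Set.ofList_eq_foldl]; rfl
  have etg : tg' = PySem.Set.ofList ((sentences.map parseSent).flatMap (fun toks => toks.map (·.2))) := by
    rw [e4, PySem.Set.ofList_eq_foldl]; rfl
  obtain ⟨h1, h2, h3, h4, h5, h6, _⟩ := hinv
  subst etr eem ev etg
  refine Prod.ext rfl (Prod.ext rfl (Prod.ext ?_ rfl))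
  -- tc'.items equals B's derived tag_counts
  show tc'.items = _
  have hfresh : ∀ a ∈ (countPairs ((sentences.map parseSent).flatMap sentTransPairs)).items,
      (PySem.Dict.empty : PySem.Dict String Int).contains a.1 = false := by
    intro a _; simp [PySem.Dict.contains, PySem.Dict.empty]
  have hB2 := PySem.Dict.items_foldl_insert_fresh
    (countPairs ((sentences.map parseSent).flatMap sentTransPairs)).items (fun q => q.1)
    (fun q => ((q.2.values).sum + (((countPairs ((sentences.map parseSent).flatMap (fun toks => toks.map (fun q => (q.2, q.1))))).getD q.1 PySem.Dict.empty).values).sum))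
    PySem.Dict.empty hfresh h1
  rw [hB2]
  have htcA : tc'.items = tc'.keys.map (fun k => (k, tc'.getD k 0)) :=
    PySem.Dict.items_eq_map_keys tc' h3 0
  have htrA : (countPairs ((sentences.map parseSent).flatMap sentTransPairs)).items
      = (countPairs ((sentences.map parseSent).flatMap sentTransPairs)).keys.map
          (fun k => (k, (countPairs ((sentences.map parseSent).flatMap sentTransPairs)).getD k PySem.Dict.empty)) :=
    PySem.Dict.items_eq_map_keys _ h1 PySem.Dict.empty
  rw [htcA, hkeq]
  conv_rhs => rw [htrA]
  simp only [List.map_map]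
  apply List.map_congr_left
  intro k _
  simp only [Function.comp]
  rw [h6 k]
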